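-- pv_equiv track=rewrite | github.com/WAFriend3416/codetree-TILs | 240822/좌우로 움직이는 로봇/robot-moving-from-side-to-side.py | simulate_movement
-- ===== SOURCE A (Python) =====
-- def simulate_movement(moves):
--     path = [100]  # Start at position 100000
--     for x , direction in moves:
--         if direction == 'L':
--             path.extend(range(path[-1] - 1, path[-1] - x - 1, -1))
--         else:  # direction == 'R'
--             path.extend(range(path[-1] + 1, path[-1] + x + 1))
--     return path
-- ===== SOURCE B (Python) =====
-- def simulate_movement(moves):
--     # Phase 1: flatten moves into unit deltas (non-positive x contributes nothing).
--     deltas = []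
--     for x, direction in moves:
--         deltas += [-1 if direction == 'L' else 1] * x
--     # Phase 2: running cumulative sum seeded at 100.
--     path = [100]
--     pos = 100
--     for d in deltas:
--         pos += d
--         path.append(pos)
--     return path
-- ===== Notes on version B (the rewrite author's own statement) =====
-- stated objective: alternative
-- what changed: Replaces the anchor-based path[-1]/extend(range) loop by a two-phase pass: first flatten the moves into a list of +-1 unit deltas, then build the path as a running cumulative sum seeded at 100.
import Mathlib
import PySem

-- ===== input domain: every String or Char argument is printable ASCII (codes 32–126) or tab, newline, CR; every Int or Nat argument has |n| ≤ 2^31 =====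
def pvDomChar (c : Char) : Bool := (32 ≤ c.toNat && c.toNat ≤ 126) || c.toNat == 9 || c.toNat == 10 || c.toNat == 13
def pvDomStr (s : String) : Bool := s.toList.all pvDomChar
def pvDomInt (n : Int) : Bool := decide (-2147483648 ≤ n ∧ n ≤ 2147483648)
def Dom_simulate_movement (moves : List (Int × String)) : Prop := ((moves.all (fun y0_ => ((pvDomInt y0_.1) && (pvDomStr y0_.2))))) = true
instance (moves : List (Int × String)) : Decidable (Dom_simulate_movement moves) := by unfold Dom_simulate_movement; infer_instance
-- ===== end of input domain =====

-- B replaces A's anchor-based path[-1]/extend(range) loop by a two-phase pass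
-- (flatten the moves into ±1 unit deltas, then cumulative sum seeded at 100); same cost.

-- ===== PORT A =====
-- path[-1]: path is never empty during the loop, so Python's path[-1] always
-- returns; pyGetD path (-1) 0 is exact there (the default 0 is never used).
def simulate_movement (moves : List (Int × String)) : List Int :=
  moves.foldl (fun path m =>
    if m.2 == "L" then
      path ++ PySem.List.pyRange (PySem.List.pyGetD path (-1) 0 - 1)
                                 (PySem.List.pyGetD path (-1) 0 - m.1 - 1) (-1)
    else
      path ++ PySem.List.pyRange (PySem.List.pyGetD path (-1) 0 + 1)
                                 (PySem.List.pyGetD path (-1) 0 + m.1 + 1) 1) [100]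

-- ===== PORT B =====
-- [step] * x in Python is x.toNat copies (non-positive x gives the empty list).
def simulate_movement_alt (moves : List (Int × String)) : List Int :=
  let deltas := moves.foldl (fun acc m =>
    acc ++ List.replicate m.1.toNat (if m.2 == "L" then (-1 : Int) else 1)) []
  (deltas.foldl (fun (st : List Int × Int) d => (st.1 ++ [st.2 + d], st.2 + d))
    ([100], 100)).1

-- ===== PRECONDITION & SPEC =====
def Spec_simulate_movement (moves : List (Int × String)) (out : List Int) : Prop := out = simulate_movement_alt moves
instance (moves : List (Int × String)) (out : List Int) : Decidable (Spec_simulate_movement moves out) := by unfold Spec_simulate_movement; infer_instance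

-- ===== CLAIM (what is proved, stated in full; the proofs are below) =====
def Claim_equal_simulate_movement : Prop := ∀ (moves : List (Int × String)), Dom_simulate_movement moves → Spec_simulate_movement moves (simulate_movement moves)

-- ===== LEMMAS AND PROOFS =====

-- the segment of positions visited from pos by n unit steps of size s
def pvSeg (pos : Int) : Nat → Int → List Int
  | 0, _ => []
  | n + 1, s => (pos + s) :: pvSeg (pos + s) n s

-- the common reference computation: moves-level fold over (path, pos)
def pvRun : List (Int × String) → List Int → Int → List Int
  | [], path, _ => path
  | m :: rest, path, pos =>
      let s : Int := if m.2 == "L" then -1 else 1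
      pvRun rest (path ++ pvSeg pos m.1.toNat s) (pos + m.1.toNat * s)

lemma pvSeg_ne_nil (pos : Int) (n : Nat) (s : Int) (h : n ≠ 0) : pvSeg pos n s ≠ [] := by
  cases n with
  | zero => exact absurd rfl h
  | succ k => simp [pvSeg]

lemma getLast?_pvSeg (n : Nat) : ∀ (pos s : Int),
    (pvSeg pos (n + 1) s).getLast? = some (pos + (n + 1) * s) := by
  induction n with
  | zero => intro pos s; simp [pvSeg]
  | succ k ih =>
    intro pos s
    show ((pos + s) :: (pos + s + s) :: pvSeg (pos + s + s) k s).getLast? = _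
    rw [List.getLast?_cons_cons,
      show ((pos + s + s) :: pvSeg (pos + s + s) k s) = pvSeg (pos + s) (k + 1) s from rfl,
      ih (pos + s) s]
    congr 1; push_cast; ring

lemma pyGetD_append_pvSeg (path : List Int) (_hp : path ≠ []) (pos : Int)
    (hl : PySem.List.pyGetD path (-1) 0 = pos) (n : Nat) (s : Int) :
    PySem.List.pyGetD (path ++ pvSeg pos n s) (-1) 0 = pos + n * s := by
  cases n with
  | zero => simpa [pvSeg] using hl
  | succ k =>
    have hne : pvSeg pos (k + 1) s ≠ [] := pvSeg_ne_nil _ _ _ (by omega)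
    have hne2 : path ++ pvSeg pos (k + 1) s ≠ [] := by simp [hne]
    rw [PySem.List.pyGetD_neg_one _ _ hne2]
    have h1 : (path ++ pvSeg pos (k + 1) s).getLast? = some (pos + (k + 1) * s) := by
      rw [List.getLast?_append_of_ne_nil _ hne, getLast?_pvSeg k pos s]
    have h2 : (path ++ pvSeg pos (k + 1) s).getLast? = some ((path ++ pvSeg pos (k + 1) s).getLast hne2) :=
      List.getLast?_eq_some_getLast hne2
    have := h2.symm.trans h1
    exact Option.some_injective _ this

-- range(pos+1, pos+x+1) = pvSeg pos x.toNat 1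
lemma pyRange_up_eq_pvSeg_nat (n : Nat) : ∀ (pos : Int),
    PySem.List.pyRange (pos + 1) (pos + n + 1) 1 = pvSeg pos n 1 := by
  induction n with
  | zero => intro pos; rw [PySem.List.pyRange_one_eq_nil (by omega)]; rfl
  | succ k ih =>
    intro pos
    rw [PySem.List.pyRange_one_cons (by push_cast; omega)]
    have := ih (pos + 1)
    push_cast
    rw [show pos + ((k : Int) + 1) + 1 = (pos + 1) + (k : Int) + 1 by ring, this]
    rfl

lemma pyRange_up_eq_pvSeg (pos x : Int) :
    PySem.List.pyRange (pos + 1) (pos + x + 1) 1 = pvSeg pos x.toNat 1 := by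
  by_cases hx : x ≤ 0
  · rw [Int.toNat_of_nonpos hx, PySem.List.pyRange_one_eq_nil (by omega)]; rfl
  · have h0 : (0:Int) ≤ x := by omega
    rw [show pos + x + 1 = pos + (x.toNat : Int) + 1 by rw [Int.toNat_of_nonneg h0]]
    exact pyRange_up_eq_pvSeg_nat x.toNat pos

-- range(pos-1, pos-x-1, -1) = pvSeg pos x.toNat (-1)
lemma pyRange_down_eq_pvSeg_nat (n : Nat) : ∀ (pos : Int),
    PySem.List.pyRange (pos - 1) (pos - n - 1) (-1) = pvSeg pos n (-1) := by
  induction n with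
  | zero => intro pos; rw [PySem.List.pyRange_neg_one_eq_nil (by omega)]; rfl
  | succ k ih =>
    intro pos
    rw [PySem.List.pyRange_neg_one_cons (by push_cast; omega)]
    have := ih (pos - 1)
    push_cast
    rw [show pos - ((k : Int) + 1) - 1 = (pos - 1) - (k : Int) - 1 by ring, this]
    show _ = pvSeg pos (k + 1) (-1)
    simp [pvSeg]
    constructor <;> [omega; rw [show pos - 1 = pos + -1 by ring]]

lemma pyRange_down_eq_pvSeg (pos x : Int) :
    PySem.List.pyRange (pos - 1) (pos - x - 1) (-1) = pvSeg pos x.toNat (-1) := by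
  by_cases hx : x ≤ 0
  · rw [Int.toNat_of_nonpos hx, PySem.List.pyRange_neg_one_eq_nil (by omega)]; rfl
  · have h0 : (0:Int) ≤ x := by omega
    rw [show pos - x - 1 = pos - (x.toNat : Int) - 1 by rw [Int.toNat_of_nonneg h0]]
    exact pyRange_down_eq_pvSeg_nat x.toNat pos

-- A's fold equals the reference computation
lemma foldA_eq_pvRun (moves : List (Int × String)) :
    ∀ (path : List Int) (pos : Int), path ≠ [] → PySem.List.pyGetD path (-1) 0 = pos →
    moves.foldl (fun path m =>
      if m.2 == "L" then
        path ++ PySem.List.pyRange (PySem.List.pyGetD path (-1) 0 - 1)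
                                   (PySem.List.pyGetD path (-1) 0 - m.1 - 1) (-1)
      else
        path ++ PySem.List.pyRange (PySem.List.pyGetD path (-1) 0 + 1)
                                   (PySem.List.pyGetD path (-1) 0 + m.1 + 1) 1) path
      = pvRun moves path pos := by
  induction moves with
  | nil => intro path pos _ _; rfl
  | cons m rest ih =>
    intro path pos hp hl
    rw [List.foldl_cons, pvRun]
    by_cases hm : m.2 == "L"
    · simp only [hm, if_pos, hl]
      rw [pyRange_down_eq_pvSeg pos m.1]
      rw [ih _ (pos + m.1.toNat * (-1)) (by simp [hp]) (pyGetD_append_pvSeg path hp pos hl _ _)]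
    · simp only [hm, if_neg, Bool.false_eq_true, not_false_iff, hl]
      rw [pyRange_up_eq_pvSeg pos m.1]
      rw [ih _ (pos + m.1.toNat * 1) (by simp [hp]) (pyGetD_append_pvSeg path hp pos hl _ _)]

-- the cumulative-sum fold over a block of n equal deltas
lemma foldB_replicate (n : Nat) (s : Int) :
    ∀ (path : List Int) (pos : Int),
    (List.replicate n s).foldl (fun (st : List Int × Int) d => (st.1 ++ [st.2 + d], st.2 + d))
      (path, pos) = (path ++ pvSeg pos n s, pos + n * s) := by
  induction n with
  | zero => intro path pos; simp [pvSeg]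
  | succ k ih =>
    intro path pos
    rw [List.replicate_succ, List.foldl_cons, ih]
    refine Prod.ext ?_ ?_
    · show path ++ [pos + s] ++ pvSeg (pos + s) k s = path ++ pvSeg pos (k + 1) s
      rw [List.append_assoc]; rfl
    · show pos + s + (k : Int) * s = pos + ((k : Int) + 1) * s
      ring

-- B's cumulative-sum fold over the flattened deltas equals the reference computation
lemma foldB_eq_pvRun (moves : List (Int × String)) :
    ∀ (path : List Int) (pos : Int),
    ((moves.flatMap (fun m => List.replicate m.1.toNat (if m.2 == "L" then (-1 : Int) else 1))).foldl
      (fun (st : List Int × Int) d => (st.1 ++ [st.2 + d], st.2 + d)) (path, pos)).1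
      = pvRun moves path pos := by
  induction moves with
  | nil => intro path pos; rfl
  | cons m rest ih =>
    intro path pos
    rw [List.flatMap_cons, List.foldl_append, foldB_replicate]
    exact ih _ _

-- ===== VERDICT (by name: the statement is the Claim_ definition above) =====
theorem simulate_movement_spec : Claim_equal_simulate_movement := by
  intro moves _
  show simulate_movement moves = simulate_movement_alt moves
  unfold simulate_movement simulate_movement_alt
  rw [PySem.List.foldl_append_eq_flatMap]
  rw [foldA_eq_pvRun moves [100] 100 (by simp) (by decide)]
  rw [show ([] : List Int) ++ _ = moves.flatMap (fun m => List.replicate m.1.toNat (if m.2 == "L" then (-1 : Int) else 1)) from List.nil_append _]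
  exact (foldB_eq_pvRun moves [100] 100).symm
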